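-- pv_equiv track=rewrite | github.com/hiwonwon/codingtest_python | 백준/Gold/1107. 리모컨/리모컨.py | nearest
-- ===== SOURCE A (Python) =====
-- button = [i for i in range(10)]
--
-- def valid(n):
--     while n > 0:
--         if (n % 10) not in button:
--             return False
--         n = n // 10
--     return True
--
-- def nearest(n):
--     if n < min(button):
--         return min(button) - n + 1
--     digit = []
--     k = n
--     while k > 0:
--         digit.append(k % 10)
--         k = k // 10
--     low, high = (0, 0)
--
--     # low 구하기
--     i = len(digit) - 1
--     while i >= 0:
--         low = low * 10 + digit[i]
--         if digit[i] in button: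
--             i -= 1
--             continue
--         else:
--             while low > 0:
--                 low -= 1
--                 if (low % 10) in button:
--                     break
--             for j in range(i):
--                 low = low * 10 + max(button)
--             break
--
--     # high 구하기
--     i = len(digit) - 1
--     while i >= 0:
--         high = high * 10 + digit[i]
--         if digit[i] in button:
--             i -= 1
--             continue
--         else:
--             while True:
--                 high += 1
--                 if (high % 10) in button:
--                     break
--             for j in range(i):
--                 high = high * 10 + min(button)
--             break
--
--     d = []
--     if valid(low):
--         d.append((n - low) + len(str(low)))
--     if valid(high):
--         d.append((high - n) + len(str(high)))
--     return min(d)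
-- ===== SOURCE B (Python) =====
-- button = [i for i in range(10)]
--
-- def nearest(n):
--     # Every digit 0-9 is on the button pad, so the nearest typeable number is n
--     # itself: cost = number of digit presses = len(str(n)).  Below 0 (= min(button))
--     # the cost is min(button) - n + 1, as in A.
--     if n < 0:
--         return 1 - n
--     return len(str(n))
-- ===== Notes on version B (the rewrite author's own statement) =====
-- stated objective: simpler
-- what changed: Since the global button list contains every digit 0-9, every number is directly typeable; B replaces A's digit-decomposition and constructive low/high candidate search with the closed form len(str(n)) (and 1-n for n<0).
import Mathlib
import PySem

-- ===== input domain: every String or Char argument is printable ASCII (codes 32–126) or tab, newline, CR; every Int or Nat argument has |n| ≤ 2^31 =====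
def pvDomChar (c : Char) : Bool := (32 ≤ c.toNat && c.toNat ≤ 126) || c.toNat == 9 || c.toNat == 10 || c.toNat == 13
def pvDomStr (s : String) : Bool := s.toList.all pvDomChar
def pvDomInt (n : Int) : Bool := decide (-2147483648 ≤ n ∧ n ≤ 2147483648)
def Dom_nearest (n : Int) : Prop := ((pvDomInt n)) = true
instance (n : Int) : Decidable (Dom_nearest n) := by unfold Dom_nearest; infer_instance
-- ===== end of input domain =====

-- B replaces A's digit-decomposition and constructive low/high candidate search by the
-- closed form len(str(n)) (and 1-n for n<0), valid because the global button pad holds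
-- every digit 0-9; objective: simpler.

-- ===== PORT A =====

-- button = [i for i in range(10)]
def button : List Int := PySem.List.pyRange 0 10 1

-- def valid(n): while n > 0: …
def valid (n : Int) : Bool :=
  if _h : 0 < n then
    if button.contains (PySem.Int.mod n 10) then valid (PySem.Int.floordiv n 10)
    else false
  else true
termination_by n.toNat
decreasing_by simp only [PySem.Int.floordiv_eq_ediv_of_pos (by norm_num : (0:Int) < 10)]; omega

-- the digit-extraction loop: while k > 0: digit.append(k % 10); k = k // 10
def digitsOf (k : Int) : List Int :=
  if _h : 0 < k then PySem.Int.mod k 10 :: digitsOf (PySem.Int.floordiv k 10)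
  else []
termination_by k.toNat
decreasing_by simp only [PySem.Int.floordiv_eq_ediv_of_pos (by norm_num : (0:Int) < 10)]; omega

-- max(button) / min(button); button is nonempty, so Python's max/min return and getD is never the default
def maxButton : Int := (PySem.List.max? button (fun x => x)).getD 0
def minButton : Int := (PySem.List.min? button (fun x => x)).getD 0

-- inner loop of "low 구하기": while low > 0: low -= 1; if (low % 10) in button: break
-- fuel 10 only to make the loop total: residues mod 10 cycle, so it breaks within 10 decrements
def lowDec : Nat → Int → Int
  | 0, low => low
  | f + 1, low =>
    if 0 < low then
      let l := low - 1
      if button.contains (PySem.Int.mod l 10) then l else lowDec f l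
    else low

-- inner loop of "high 구하기": while True: high += 1; if (high % 10) in button: break
-- fuel 10 only to make the loop total: residues mod 10 cycle, so it breaks within 10 increments
def highInc : Nat → Int → Int
  | 0, h => h
  | f + 1, h =>
    let h' := h + 1
    if button.contains (PySem.Int.mod h' 10) then h' else highInc f h'

-- outer loop of "low 구하기" (i counts down from len(digit)-1; digit[i] is in range on every call)
def lowLoop (digit : List Int) (i : Int) (low : Int) : Int :=
  if _h : 0 ≤ i then
    let low' := low * 10 + PySem.List.pyGetD digit i 0
    if button.contains (PySem.List.pyGetD digit i 0) then lowLoop digit (i - 1) low'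
    else
      (PySem.List.pyRange 0 i 1).foldl (fun l _ => l * 10 + maxButton) (lowDec 10 low')
  else low
termination_by (i + 1).toNat
decreasing_by omega

-- outer loop of "high 구하기"
def highLoop (digit : List Int) (i : Int) (high : Int) : Int :=
  if _h : 0 ≤ i then
    let high' := high * 10 + PySem.List.pyGetD digit i 0
    if button.contains (PySem.List.pyGetD digit i 0) then highLoop digit (i - 1) high'
    else
      (PySem.List.pyRange 0 i 1).foldl (fun h _ => h * 10 + minButton) (highInc 10 high')
  else high
termination_by (i + 1).toNat
decreasing_by omega

def nearest (n : Int) : Int :=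
  if n < minButton then minButton - n + 1
  else
    let digit := digitsOf n
    let low := lowLoop digit ((digit.length : Int) - 1) 0
    let high := highLoop digit ((digit.length : Int) - 1) 0
    let d : List Int :=
      (if valid low then [(n - low) + PySem.Str.len (PySem.Int.toStr low)] else []) ++
      (if valid high then [(high - n) + PySem.Str.len (PySem.Int.toStr high)] else [])
    -- min(d); d is nonempty whenever this line is reached (Python would raise on []), so getD is never the default
    (PySem.List.min? d (fun x => x)).getD 0

-- ===== PORT B =====
def nearest_alt (n : Int) : Int :=
  if n < 0 then 1 - n
  else PySem.Str.len (PySem.Int.toStr n)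

-- ===== PRECONDITION & SPEC =====
def Spec_nearest (n : Int) (out : Int) : Prop := out = nearest_alt n
instance (n : Int) (out : Int) : Decidable (Spec_nearest n out) := by unfold Spec_nearest; infer_instance

-- ===== CLAIM (what is proved, stated in full; the proofs are below) =====
def Claim_equal_nearest : Prop := ∀ (n : Int), Dom_nearest n → Spec_nearest n (nearest n)

-- ===== LEMMAS AND PROOFS =====

theorem minButton_eq : minButton = 0 := by decide

theorem contains_mod_ten (a : Int) : button.contains (PySem.Int.mod a 10) = true := by
  have h0 := PySem.Int.mod_nonneg a (b := 10) (by norm_num)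
  have h1 := PySem.Int.mod_lt a (b := 10) (by norm_num)
  simp [button, PySem.List.mem_pyRange_one]
  omega

theorem valid_true (n : Int) : valid n = true := by
  fun_induction valid n with
  | case1 n h hmem ih => exact ih
  | case2 n h hmem => exact absurd (contains_mod_ten n) (by simpa using hmem)
  | case3 n h => rfl

theorem digitsOf_mem (n : Int) : ∀ x ∈ digitsOf n, button.contains x = true := by
  fun_induction digitsOf n with
  | case1 n h ih =>
    intro x hx
    rcases List.mem_cons.mp hx with rfl | hx
    · exact contains_mod_ten n
    · exact ih x hx
  | case2 n h => intro x hx; simp at hx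

theorem digitsOf_fold (n : Int) :
    0 ≤ n → ∀ acc : Int, (digitsOf n).reverse.foldl (fun a d => a * 10 + d) acc
      = acc * 10 ^ (digitsOf n).length + n := by
  fun_induction digitsOf n with
  | case1 n h ih =>
    intro _ acc
    have hq : 0 ≤ PySem.Int.floordiv n 10 := by
      rw [PySem.Int.floordiv_eq_ediv_of_pos (by norm_num)]; omega
    simp only [List.reverse_cons, List.foldl_append, List.foldl_cons, List.foldl_nil,
      List.length_cons, ih hq]
    have hrec := PySem.Int.floordiv_mul_add_mod n 10
    ring_nf
    ring_nf at hrec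
    omega
  | case2 n h =>
    intro hn acc
    simp
    omega

-- lowLoop with every digit on the pad is the plain base-10 reconstruction of the taken prefix
theorem lowLoop_fold (digit : List Int) (hmem : ∀ x ∈ digit, button.contains x = true) :
    ∀ (j : Nat), j < digit.length → ∀ low : Int,
      lowLoop digit (j : Int) low
        = (digit.take (j + 1)).reverse.foldl (fun a d => a * 10 + d) low := by
  intro j
  induction j with
  | zero =>
    intro hlt low
    rcases digit with _ | ⟨a, t⟩
    · simp at hlt
    · have hA : button.contains a = true := hmem a List.mem_cons_self
      rw [lowLoop.eq_def, dif_pos (by omega)]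
      simp only [Nat.cast_zero, PySem.List.pyGetD_zero_cons, hA, if_true]
      rw [lowLoop.eq_def, dif_neg (by omega)]
      simp
  | succ j ih =>
    intro hlt low
    have hx : PySem.List.pyGetD digit ((j : Int) + 1) 0 = digit[j + 1]'hlt := by
      rw [PySem.List.pyGetD_eq_getElem digit (i := (j : Int) + 1) 0 (by omega)
        (by push_cast; omega)]
      have ht : ((j : Int) + 1).toNat = j + 1 := by omega
      simp [ht]
    rw [lowLoop.eq_def, dif_pos (by omega)]
    push_cast
    simp only [hx, hmem _ (List.getElem_mem _), if_true]
    have hcast : ((j : Int) + 1) - 1 = ((j : Nat) : Int) := by ring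
    rw [hcast, ih (by omega)]
    have htake : digit.take (j + 1 + 1) = digit.take (j + 1) ++ [digit[j + 1]'hlt] := by
      rw [List.take_add_one, List.getElem?_eq_getElem hlt]; rfl
    rw [htake, List.reverse_append]
    simp only [List.reverse_cons, List.reverse_nil, List.nil_append, List.singleton_append,
      List.foldl_cons]

theorem highLoop_fold (digit : List Int) (hmem : ∀ x ∈ digit, button.contains x = true) :
    ∀ (j : Nat), j < digit.length → ∀ high : Int,
      highLoop digit (j : Int) high
        = (digit.take (j + 1)).reverse.foldl (fun a d => a * 10 + d) high := by
  intro j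
  induction j with
  | zero =>
    intro hlt high
    rcases digit with _ | ⟨a, t⟩
    · simp at hlt
    · have hA : button.contains a = true := hmem a List.mem_cons_self
      rw [highLoop.eq_def, dif_pos (by omega)]
      simp only [Nat.cast_zero, PySem.List.pyGetD_zero_cons, hA, if_true]
      rw [highLoop.eq_def, dif_neg (by omega)]
      simp
  | succ j ih =>
    intro hlt high
    have hx : PySem.List.pyGetD digit ((j : Int) + 1) 0 = digit[j + 1]'hlt := by
      rw [PySem.List.pyGetD_eq_getElem digit (i := (j : Int) + 1) 0 (by omega)
        (by push_cast; omega)]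
      have ht : ((j : Int) + 1).toNat = j + 1 := by omega
      simp [ht]
    rw [highLoop.eq_def, dif_pos (by omega)]
    push_cast
    simp only [hx, hmem _ (List.getElem_mem _), if_true]
    have hcast : ((j : Int) + 1) - 1 = ((j : Nat) : Int) := by ring
    rw [hcast, ih (by omega)]
    have htake : digit.take (j + 1 + 1) = digit.take (j + 1) ++ [digit[j + 1]'hlt] := by
      rw [List.take_add_one, List.getElem?_eq_getElem hlt]; rfl
    rw [htake, List.reverse_append]
    simp only [List.reverse_cons, List.reverse_nil, List.nil_append, List.singleton_append,
      List.foldl_cons]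

theorem lowLoop_full (n : Int) (hn : 0 ≤ n) :
    lowLoop (digitsOf n) (((digitsOf n).length : Int) - 1) 0 = n := by
  rcases eq_or_lt_of_le hn with rfl | hpos
  · have h0 : digitsOf 0 = [] := by rw [digitsOf.eq_def]; norm_num
    rw [h0]
    rw [lowLoop.eq_def, dif_neg (by norm_num)]
  · have hlen : 0 < (digitsOf n).length := by
      rw [digitsOf.eq_def, dif_pos hpos]; simp
    have hcast : (((digitsOf n).length : Int) - 1) = (((digitsOf n).length - 1 : Nat) : Int) := by
      omega
    rw [hcast, lowLoop_fold (digitsOf n) (digitsOf_mem n) _ (by omega) 0]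
    have ht : (digitsOf n).length - 1 + 1 = (digitsOf n).length := by omega
    rw [ht, List.take_length, digitsOf_fold n (by omega) 0]
    ring

theorem highLoop_full (n : Int) (hn : 0 ≤ n) :
    highLoop (digitsOf n) (((digitsOf n).length : Int) - 1) 0 = n := by
  rcases eq_or_lt_of_le hn with rfl | hpos
  · have h0 : digitsOf 0 = [] := by rw [digitsOf.eq_def]; norm_num
    rw [h0]
    rw [highLoop.eq_def, dif_neg (by norm_num)]
  · have hlen : 0 < (digitsOf n).length := by
      rw [digitsOf.eq_def, dif_pos hpos]; simp
    have hcast : (((digitsOf n).length : Int) - 1) = (((digitsOf n).length - 1 : Nat) : Int) := by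
      omega
    rw [hcast, highLoop_fold (digitsOf n) (digitsOf_mem n) _ (by omega) 0]
    have ht : (digitsOf n).length - 1 + 1 = (digitsOf n).length := by omega
    rw [ht, List.take_length, digitsOf_fold n (by omega) 0]
    ring

theorem min_pair_self (x : Int) :
    (PySem.List.min? [x, x] (fun y => y)).getD 0 = x := by
  rw [PySem.List.min?_id_cons]
  simp

-- ===== VERDICT (by name: the statement is the Claim_ definition above) =====
theorem nearest_spec : Claim_equal_nearest := by
  intro n _
  unfold Spec_nearest
  by_cases hneg : n < 0
  · rw [nearest, if_pos (by rw [minButton_eq]; exact hneg)]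
    rw [nearest_alt, if_pos hneg, minButton_eq]
    ring
  · rw [not_lt] at hneg
    rw [nearest, if_neg (by rw [minButton_eq]; omega)]
    simp only [lowLoop_full n hneg, highLoop_full n hneg, valid_true, if_pos, sub_self, zero_add]
    simp only [List.singleton_append]
    rw [min_pair_self, nearest_alt, if_neg (by omega)]
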